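-- pv_equiv track=rewrite | github.com/16arpi/wikilink | scripts/SecondDumpCleaning.py | strip_links
-- ===== SOURCE A (Python) =====
-- def iter_link_spans(text: str):
--     """
--     Yield (span_start, span_end_excl, inner) for each [[...]] block (best-effort).
--     """
--     i = 0
--     while True:
--         a = text.find("[[", i)
--         if a < 0:
--             return
--         b = text.find("]]", a + 2)
--         if b < 0:
--             return
--         inner = text[a + 2: b]
--         yield a, b + 2, inner
--         i = b + 2
--
-- def strip_links(text: str) -> str:
--     """
--     Replace [[...]] with spaces; used for PASS B plain-text counting.
--     """
--     if "[[" not in text: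
--         return text
--     out = []
--     i = 0
--     for a, b, _inner in iter_link_spans(text):
--         if a > i:
--             out.append(text[i:a])
--         out.append(" ")
--         i = b
--     if i < len(text):
--         out.append(text[i:])
--     return "".join(out)
-- ===== SOURCE B (Python) =====
-- def strip_links(text: str) -> str:
--     """
--     Replace [[...]] with spaces; single character-level scan (no substring
--     find of "[[" spans): an explicit automaton walks the text once, and on
--     an opening "[[" an inner scan looks for the first "]]"; an unclosed
--     "[[" copies the rest verbatim.
--     """
--     out = []
--     i, n = 0, len(text)
--     while i < n:
--         if text[i] == '[' and i + 1 < n and text[i + 1] == '[':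
--             j = i + 2
--             while j + 1 < n and (text[j] != ']' or text[j + 1] != ']'):
--                 j += 1
--             if j + 1 < n:
--                 out.append(' ')
--                 i = j + 2
--                 continue
--             out.append(text[i:])
--             break
--         out.append(text[i])
--         i += 1
--     return ''.join(out)
-- ===== Notes on version B (the rewrite author's own statement) =====
-- stated objective: alternative
-- what changed: B replaces A's generator of (start,end) link spans found by repeated str.find plus slice-joining with a single character-level automaton that walks the text once, emitting characters directly and scanning ahead for ']]' only when it stands on '[['.
import Mathlib
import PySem

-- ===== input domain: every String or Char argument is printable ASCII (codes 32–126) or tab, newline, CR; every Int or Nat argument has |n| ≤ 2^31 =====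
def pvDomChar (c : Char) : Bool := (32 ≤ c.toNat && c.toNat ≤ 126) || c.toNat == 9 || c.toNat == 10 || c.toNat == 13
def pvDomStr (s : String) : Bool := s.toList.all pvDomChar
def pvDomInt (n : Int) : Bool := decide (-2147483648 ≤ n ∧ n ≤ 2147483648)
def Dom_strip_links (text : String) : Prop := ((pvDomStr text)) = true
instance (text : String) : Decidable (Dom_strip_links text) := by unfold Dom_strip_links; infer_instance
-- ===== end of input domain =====

-- B replaces A's repeated substring-find over (start, end) spans with a single
-- character-level automaton scan; objective: alternative (no speed claim).

-- ===== PORT A =====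
-- A is ported on List Char (''.join(out) of slices = concatenation of the char pieces).
-- 'stripLinksAux' is A's 'for a, b, _inner in iter_link_spans(text)' loop fused with the
-- generator's own while-loop (they share the cursor): a/b/i are the same indices, 'out'
-- the accumulated pieces.  The extra 'hi' argument is only the termination invariant.

theorem stripLinksAux_bound (cs : List Char) (i : Nat) (hi : i ≤ cs.length)
    (ha : ¬ PySem.Chars.findFrom cs ['[', '['] (i : Int) none < 0)
    (hb : ¬ PySem.Chars.findFrom cs [']', ']']
        (PySem.Chars.findFrom cs ['[', '['] (i : Int) none + 2) none < 0) :
    i < (PySem.Chars.findFrom cs [']', ']']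
        (PySem.Chars.findFrom cs ['[', '['] (i : Int) none + 2) none).toNat + 2 ∧
    (PySem.Chars.findFrom cs [']', ']']
        (PySem.Chars.findFrom cs ['[', '['] (i : Int) none + 2) none).toNat + 2 ≤ cs.length := by
  set A := PySem.Chars.findFrom cs ['[', '['] (i : Int) none with hA
  have hAspec := PySem.Chars.findFrom_natCast_spec cs ['[', '['] i hi (by omega)
  rw [← hA] at hAspec
  obtain ⟨hiA, hApre, -⟩ := hAspec
  have hA2 : A.toNat + 2 ≤ cs.length := by
    have := hApre.length_le
    simp at this
    omega
  have hcast : A + 2 = ((A.toNat + 2 : Nat) : Int) := by omega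
  rw [hcast] at hb ⊢
  set B := PySem.Chars.findFrom cs [']', ']'] ((A.toNat + 2 : Nat) : Int) none with hB
  have hBspec := PySem.Chars.findFrom_natCast_spec cs [']', ']'] (A.toNat + 2) hA2 (by omega)
  rw [← hB] at hBspec
  obtain ⟨hAB, hBpre, -⟩ := hBspec
  have hB2 : B.toNat + 2 ≤ cs.length := by
    have := hBpre.length_le
    simp at this
    omega
  constructor
  · omega
  · omega

def stripLinksAux (cs : List Char) (i : Nat) (out : List Char) (hi : i ≤ cs.length) : List Char :=
  let a := PySem.Chars.findFrom cs ['[', '['] (i : Int) none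
  if ha : a < 0 then
    -- generator yields nothing more; 'if i < len(text): out.append(text[i:])'
    if i < cs.length then out ++ PySem.Chars.slice cs (some (i : Int)) none else out
  else
    let b := PySem.Chars.findFrom cs [']', ']'] (a + 2) none
    if hb : b < 0 then
      if i < cs.length then out ++ PySem.Chars.slice cs (some (i : Int)) none else out
    else
      stripLinksAux cs (b.toNat + 2)
        (out ++ (if (i : Int) < a then PySem.Chars.slice cs (some (i : Int)) (some a) else []) ++ [' '])
        (stripLinksAux_bound cs i hi ha hb).2
termination_by cs.length - i
decreasing_by
  have := stripLinksAux_bound cs i hi ha hb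
  omega

def strip_links (text : String) : String :=
  if PySem.Str.isIn "[[" text = false then text
  else String.ofList (stripLinksAux text.toList 0 [] (by simp))

-- ===== PORT B =====
-- transliteration of Source B: 'stripScan' is the inner 'while j + 1 < n and ...' loop
-- (returns the final j), 'stripAlt' the outer 'while i < n' loop with accumulator 'out'.

def stripScan (cs : List Char) (j : Nat) : Nat :=
  if j + 1 < cs.length then
    if cs[j]? ≠ some ']' ∨ cs[j+1]? ≠ some ']' then stripScan cs (j+1) else j
  else j
termination_by cs.length - j

theorem le_stripScan (cs : List Char) (j : Nat) : j ≤ stripScan cs j := by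
  rw [stripScan]
  split
  · split
    · have := le_stripScan cs (j+1)
      omega
    · exact le_rfl
  · exact le_rfl
termination_by cs.length - j

def stripAlt (cs : List Char) (i : Nat) (out : List Char) : List Char :=
  if i < cs.length then
    if cs[i]? = some '[' ∧ i + 1 < cs.length ∧ cs[i+1]? = some '[' then
      let j := stripScan cs (i+2)
      if j + 1 < cs.length then
        stripAlt cs (j+2) (out ++ [' '])
      else
        out ++ cs.drop i   -- out.append(text[i:]); break
    else
      stripAlt cs (i+1) (out ++ [cs[i]!])
  else out
termination_by cs.length - i
decreasing_by
  · have := le_stripScan cs (i+2)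
    omega
  · omega

def strip_links_alt (text : String) : String :=
  String.ofList (stripAlt text.toList 0 [])

-- ===== PRECONDITION & SPEC =====
def Spec_strip_links (text : String) (out : String) : Prop := out = strip_links_alt text
instance (text : String) (out : String) : Decidable (Spec_strip_links text out) := by unfold Spec_strip_links; infer_instance

-- ===== CLAIM (what is proved, stated in full; the proofs are below) =====
def Claim_equal_strip_links : Prop := ∀ (text : String), Dom_strip_links text → Spec_strip_links text (strip_links text)

-- ===== LEMMAS AND PROOFS =====

theorem prefix_two_iff (cs : List Char) (i : Nat) (c1 c2 : Char) :
    [c1, c2] <+: cs.drop i ↔ cs[i]? = some c1 ∧ cs[i+1]? = some c2 := by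
  constructor
  · rintro ⟨t, ht⟩
    refine ⟨?_, ?_⟩
    · have : (cs.drop i)[0]? = some c1 := by rw [← ht]; rfl
      simpa using this
    · have : (cs.drop i)[1]? = some c2 := by rw [← ht]; rfl
      simpa using this
  · rintro ⟨e0, e1⟩
    rw [List.getElem?_eq_some_iff] at e0 e1
    obtain ⟨h0, e0⟩ := e0; obtain ⟨h1, e1⟩ := e1
    refine ⟨cs.drop (i+2), ?_⟩
    rw [List.drop_eq_getElem_cons h0, List.drop_eq_getElem_cons h1, e0, e1]
    rfl

-- no occurrence of sub inside cs.drop k means no occurrence starting at any m ≥ k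
theorem no_prefix_of_not_infix (cs sub : List Char) (k : Nat)
    (h : ¬ sub <:+: cs.drop k) (m : Nat) (hm : k ≤ m) : ¬ sub <+: cs.drop m := by
  intro hpre
  apply h
  have : cs.drop m = (cs.drop k).drop (m - k) := by
    rw [List.drop_drop]
    congr 1
    omega
  rw [this] at hpre
  exact hpre.isInfix.trans (List.drop_suffix _ _).isInfix

theorem stripScan_eq (cs : List Char) (j b : Nat) (hjb : j ≤ b)
    (hb : [']', ']'] <+: cs.drop b)
    (hmin : ∀ m, j ≤ m → m < b → ¬ [']', ']'] <+: cs.drop m) :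
    stripScan cs j = b := by
  have hb' := hb
  rw [prefix_two_iff] at hb'
  obtain ⟨e0, e1⟩ := hb'
  have hblen : b + 1 < cs.length := (List.getElem?_eq_some_iff.mp e1).1
  rw [stripScan]
  rcases Nat.lt_or_ge j b with hlt | hge
  · have hcond : j + 1 < cs.length := by omega
    rw [if_pos hcond]
    have hnot : ¬ [']', ']'] <+: cs.drop j := hmin j le_rfl hlt
    rw [prefix_two_iff] at hnot
    have : cs[j]? ≠ some ']' ∨ cs[j+1]? ≠ some ']' := by tauto
    rw [if_pos this]
    exact stripScan_eq cs (j+1) b (by omega) hb (fun m h1 h2 => hmin m (by omega) h2)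
  · have hjb' : j = b := by omega
    subst hjb'
    rw [if_pos hblen]
    have : ¬ (cs[j]? ≠ some ']' ∨ cs[j+1]? ≠ some ']') := by tauto
    rw [if_neg this]
termination_by b - j

theorem stripScan_none (cs : List Char) (j : Nat)
    (h : ∀ m, j ≤ m → ¬ [']', ']'] <+: cs.drop m) :
    ¬ (stripScan cs j + 1 < cs.length) := by
  rw [stripScan]
  split
  · rename_i hj
    have hnot := h j le_rfl
    rw [prefix_two_iff] at hnot
    have : cs[j]? ≠ some ']' ∨ cs[j+1]? ≠ some ']' := by tauto
    rw [if_pos this]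
    exact stripScan_none cs (j+1) (fun m hm => h m (by omega))
  · rename_i hj
    exact hj
termination_by cs.length - j

theorem stripAlt_open (cs : List Char) (i : Nat) (out : List Char) (b : Nat)
    (hcond : cs[i]? = some '[' ∧ i + 1 < cs.length ∧ cs[i+1]? = some '[')
    (hscan : stripScan cs (i+2) = b) (hb : b + 1 < cs.length) :
    stripAlt cs i out = stripAlt cs (b+2) (out ++ [' ']) := by
  rw [stripAlt, if_pos (by omega : i < cs.length), if_pos hcond]
  simp only [hscan, if_pos hb]

theorem stripAlt_open_fail (cs : List Char) (i : Nat) (out : List Char)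
    (hcond : cs[i]? = some '[' ∧ i + 1 < cs.length ∧ cs[i+1]? = some '[')
    (hnone : ¬ (stripScan cs (i+2) + 1 < cs.length)) :
    stripAlt cs i out = out ++ cs.drop i := by
  rw [stripAlt, if_pos (by omega : i < cs.length), if_pos hcond]
  simp only [if_neg hnone]

theorem stripAlt_end (cs : List Char) (i : Nat) (out : List Char) (h : cs.length ≤ i) :
    stripAlt cs i out = out := by
  rw [stripAlt, if_neg (by omega)]

theorem stripAlt_skip (cs : List Char) (a : Nat) (ha : a ≤ cs.length)
    (i : Nat) (out : List Char) (hia : i ≤ a)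
    (h : ∀ j, i ≤ j → j < a → ¬ ['[', '['] <+: cs.drop j) :
    stripAlt cs i out = stripAlt cs a (out ++ (cs.drop i).take (a - i)) := by
  rcases Nat.lt_or_ge i a with hlt | hge
  · have h0 : i < cs.length := by omega
    rw [stripAlt, if_pos h0]
    have hnot := h i le_rfl hlt
    rw [prefix_two_iff] at hnot
    have hcond : ¬ (cs[i]? = some '[' ∧ i + 1 < cs.length ∧ cs[i+1]? = some '[') := by
      rintro ⟨e0, -, e1⟩
      exact hnot ⟨e0, e1⟩
    rw [if_neg hcond]
    rw [stripAlt_skip cs a ha (i+1) (out ++ [cs[i]!]) (by omega)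
      (fun j h1 h2 => h j (by omega) h2)]
    congr 1
    have hd : cs.drop i = cs[i] :: cs.drop (i+1) := List.drop_eq_getElem_cons h0
    have hbang : cs[i]! = cs[i] := by
      simp [List.getElem!_eq_getElem?_getD, List.getElem?_eq_getElem h0]
    rw [hd, hbang]
    have : a - i = (a - (i+1)) + 1 := by omega
    rw [this, List.take_succ_cons]
    simp
  · have : i = a := by omega
    subst this
    simp
termination_by a - i

-- A's final 'out.append(text[i:])' (guarded by i < len) equals appending drop i unguarded
theorem tail_append (cs : List Char) (i : Nat) (out : List Char) (hi : i ≤ cs.length) :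
    (if i < cs.length then out ++ PySem.Chars.slice cs (some (i : Int)) none else out)
      = out ++ cs.drop i := by
  rcases Nat.lt_or_ge i cs.length with h | h
  · rw [if_pos h]
    simp [PySem.List.slice_from_natCast]
  · rw [if_neg (by omega)]
    have : cs.drop i = [] := List.drop_eq_nil_of_le (by omega)
    simp [this]

theorem stripLinksAux_congr (cs : List Char) {i1 i2 : Nat} {out1 out2 : List Char}
    (h1 : i1 ≤ cs.length) (h2 : i2 ≤ cs.length) (e1 : i1 = i2) (e2 : out1 = out2) :
    stripLinksAux cs i1 out1 h1 = stripLinksAux cs i2 out2 h2 := by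
  subst e1; subst e2; rfl

theorem stripLinksAux_eq_stripAlt (cs : List Char) :
    ∀ n i out (hi : i ≤ cs.length), cs.length - i = n →
    stripLinksAux cs i out hi = stripAlt cs i out := by
  intro n
  induction n using Nat.strong_induction_on with
  | _ n IH =>
    intro i out hi hn
    rw [stripLinksAux]
    have hAeq : PySem.Chars.findFrom cs ['[', '['] (i : Int) none
        = if PySem.Chars.find (cs.drop i) ['[', '['] = -1 then -1
          else (i : Int) + PySem.Chars.find (cs.drop i) ['[', '['] :=
      PySem.Chars.findFrom_natCast cs ['[', '['] i hi
    by_cases hFneg : PySem.Chars.find (cs.drop i) ['[', '['] = -1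
    · rw [dif_pos (by rw [hAeq, if_pos hFneg]; norm_num)]
      rw [tail_append cs i out hi]
      have hno : ∀ m, i ≤ m → ¬ ['[', '['] <+: cs.drop m :=
        no_prefix_of_not_infix cs ['[', '['] i
          ((PySem.Chars.find_eq_neg_one_iff _ _).mp hFneg)
      rw [stripAlt_skip cs cs.length le_rfl i out hi (fun j h1 _ => hno j h1),
        stripAlt_end cs cs.length _ le_rfl]
      simp
    · have hF0 : 0 ≤ PySem.Chars.find (cs.drop i) ['[', '['] := by
        have := PySem.Chars.neg_one_le_find (cs.drop i) ['[', '[']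
        omega
      obtain ⟨hFpre, hFmin⟩ := PySem.Chars.find_spec (s := cs.drop i) (sub := ['[', '[']) hF0
      set a : Nat := i + (PySem.Chars.find (cs.drop i) ['[', '[']).toNat with hadef
      have hAe : PySem.Chars.findFrom cs ['[', '['] (i : Int) none = ((a : Nat) : Int) := by
        rw [hAeq, if_neg hFneg, hadef]; push_cast; try omega
      rw [dif_neg (by rw [hAe]; omega)]
      have hdropa : (cs.drop i).drop (PySem.Chars.find (cs.drop i) ['[', '[']).toNat = cs.drop a := by
        rw [List.drop_drop]
      rw [hdropa] at hFpre
      have ha2 : a + 2 ≤ cs.length := by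
        have := hFpre.length_le
        simp at this
        omega
      have hamin : ∀ m, i ≤ m → m < a → ¬ ['[', '['] <+: cs.drop m := by
        intro m h1 h2 hpre
        apply hFmin (m - i) (by omega)
        have : cs.drop m = (cs.drop i).drop (m - i) := by
          rw [List.drop_drop]; try (congr 1; omega)
        rwa [this] at hpre
      have hBeq : PySem.Chars.findFrom cs [']', ']']
            (PySem.Chars.findFrom cs ['[', '['] (i : Int) none + 2) none
          = if PySem.Chars.find (cs.drop (a + 2)) [']', ']'] = -1 then -1
            else ((a + 2 : Nat) : Int) + PySem.Chars.find (cs.drop (a + 2)) [']', ']'] := by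
        rw [hAe, show ((a : Nat) : Int) + 2 = ((a + 2 : Nat) : Int) by push_cast; ring,
          PySem.Chars.findFrom_natCast cs [']', ']'] (a + 2) ha2]
      have hRHS : stripAlt cs i out = stripAlt cs a (out ++ (cs.drop i).take (a - i)) :=
        stripAlt_skip cs a (by omega) i out (by omega) hamin
      have hacond : cs[a]? = some '[' ∧ a + 1 < cs.length ∧ cs[a+1]? = some '[' := by
        have := (prefix_two_iff cs a '[' '[').mp hFpre
        exact ⟨this.1, (List.getElem?_eq_some_iff.mp this.2).1, this.2⟩
      have hpiece : (if (i : Int) < PySem.Chars.findFrom cs ['[', '['] (i : Int) none then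
            PySem.Chars.slice cs (some (i : Int))
              (some (PySem.Chars.findFrom cs ['[', '['] (i : Int) none)) else [])
          = (cs.drop i).take (a - i) := by
        rw [hAe]
        by_cases hia : i < a
        · rw [if_pos (by exact_mod_cast hia)]
          simp [PySem.List.slice_natCast]
        · rw [if_neg (by exact_mod_cast hia)]
          have ha0 : a - i = 0 := by omega
          rw [ha0]
          simp
      by_cases hGneg : PySem.Chars.find (cs.drop (a + 2)) [']', ']'] = -1
      · rw [dif_pos (by rw [hBeq, if_pos hGneg]; norm_num)]
        rw [tail_append cs i out hi]
        have hnoG : ∀ m, a + 2 ≤ m → ¬ [']', ']'] <+: cs.drop m :=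
          no_prefix_of_not_infix cs [']', ']'] (a + 2)
            ((PySem.Chars.find_eq_neg_one_iff _ _).mp hGneg)
        rw [hRHS, stripAlt_open_fail cs a _ hacond (stripScan_none cs (a + 2) hnoG)]
        have hsplit : (cs.drop i).take (a - i) ++ cs.drop a = cs.drop i := by
          rw [show cs.drop a = (cs.drop i).drop (a - i) by rw [List.drop_drop]; try (congr 1; omega),
            List.take_append_drop]
        rw [List.append_assoc, hsplit]
      · have hG0 : 0 ≤ PySem.Chars.find (cs.drop (a + 2)) [']', ']'] := by
          have := PySem.Chars.neg_one_le_find (cs.drop (a + 2)) [']', ']']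
          omega
        obtain ⟨hGpre, hGmin⟩ := PySem.Chars.find_spec (s := cs.drop (a + 2)) (sub := [']', ']']) hG0
        set b : Nat := a + 2 + (PySem.Chars.find (cs.drop (a + 2)) [']', ']']).toNat with hbdef
        have hdropb : (cs.drop (a + 2)).drop (PySem.Chars.find (cs.drop (a + 2)) [']', ']']).toNat
            = cs.drop b := by
          rw [List.drop_drop]
        rw [hdropb] at hGpre
        have hb2 : b + 2 ≤ cs.length := by
          have := hGpre.length_le
          simp at this
          omega
        have hbmin : ∀ m, a + 2 ≤ m → m < b → ¬ [']', ']'] <+: cs.drop m := by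
          intro m h1 h2 hpre
          apply hGmin (m - (a + 2)) (by omega)
          have : cs.drop m = (cs.drop (a + 2)).drop (m - (a + 2)) := by
            rw [List.drop_drop]; try (congr 1; omega)
          rwa [this] at hpre
        rw [dif_neg (by rw [hBeq, if_neg hGneg]; omega)]
        have hBtoNat : (PySem.Chars.findFrom cs [']', ']']
            (PySem.Chars.findFrom cs ['[', '['] (i : Int) none + 2) none).toNat + 2 = b + 2 := by
          rw [hBeq, if_neg hGneg]; omega
        rw [stripLinksAux_congr cs _ (by omega : b + 2 ≤ cs.length) hBtoNat
          (by rw [hpiece])]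
        rw [IH (cs.length - (b + 2)) (by omega) (b + 2) _ _ rfl]
        rw [hRHS, stripAlt_open cs a _ b hacond
          (stripScan_eq cs (a + 2) b (by omega) hGpre hbmin) (by omega)]

-- ===== VERDICT (by name: the statement is the Claim_ definition above) =====
theorem strip_links_spec : Claim_equal_strip_links := by
  intro text _
  unfold Spec_strip_links strip_links strip_links_alt
  by_cases h : PySem.Str.isIn "[[" text = false
  · rw [if_pos h]
    have hno : ∀ m, 0 ≤ m → ¬ ['[', '['] <+: text.toList.drop m := by
      intro m _ hpre
      have : PySem.Chars.isIn "[[".toList text.toList = true :=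
        (PySem.Chars.exists_prefix_drop_iff_isIn _ _).mp ⟨m, by simpa using hpre⟩
      rw [PySem.Str.isIn_eq] at h
      rw [h] at this
      exact Bool.false_ne_true this
    rw [stripAlt_skip text.toList text.toList.length le_rfl 0 [] (by omega)
      (fun j h1 _ => hno j h1), stripAlt_end _ _ _ le_rfl]
    have ht : List.take text.toList.length text.toList = text.toList := List.take_length
    simp only [List.drop_zero, List.nil_append, Nat.sub_zero]
    rw [ht, String.ofList_toList]
  · rw [if_neg h]
    rw [stripLinksAux_eq_stripAlt text.toList (text.toList.length - 0) 0 [] (by simp) rfl]
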